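-- pv_equiv track=rewrite | github.com/bineficial/meta-interview | screening/python/count_friends.py | solution
-- ===== SOURCE A (Python) =====
-- def solution(data):
--     counts = {}
--
--     for friend_group in data:
--         for person in friend_group:
--             if len(friend_group) == 1:
--                 counts[person] = counts.get(person, 0) + 0
--             else:
--                 counts[person] = counts.get(person, 0) + 1
--
--     return counts
-- ===== SOURCE B (Python) =====
-- def solution(data):
--     # sort-then-scan: one flat sorted list of the occurrences that count, then a
--     # run-length pass over it (equal persons are adjacent after sorting)
--     members = sorted(p for g in data if len(g) != 1 for p in g)
--     counts = {}
--     prev = None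
--     run = 0
--     for p in members:
--         if prev is not None and p == prev:
--             run += 1
--         else:
--             if prev is not None:
--                 counts[prev] = run
--             prev = p
--             run = 1
--     if prev is not None:
--         counts[prev] = run
--     # result: every person in first-occurrence order, 0 if never counted
--     return {q: counts.get(q, 0) for q in dict.fromkeys(q for g in data for q in g)}
-- ===== Notes on version B (the rewrite author's own statement) =====
-- stated objective: alternative
-- what changed: Replaces A's single interleaved loop that mutates a running dict (get-with-default plus a per-person 0/1 branch) by sort-then-scan: sort the flat list of occurrences in non-singleton groups, run-length count the adjacent equal runs in one scan, then map every distinct person (first-occurrence order) to its run length with 0 as default.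
import Mathlib
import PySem

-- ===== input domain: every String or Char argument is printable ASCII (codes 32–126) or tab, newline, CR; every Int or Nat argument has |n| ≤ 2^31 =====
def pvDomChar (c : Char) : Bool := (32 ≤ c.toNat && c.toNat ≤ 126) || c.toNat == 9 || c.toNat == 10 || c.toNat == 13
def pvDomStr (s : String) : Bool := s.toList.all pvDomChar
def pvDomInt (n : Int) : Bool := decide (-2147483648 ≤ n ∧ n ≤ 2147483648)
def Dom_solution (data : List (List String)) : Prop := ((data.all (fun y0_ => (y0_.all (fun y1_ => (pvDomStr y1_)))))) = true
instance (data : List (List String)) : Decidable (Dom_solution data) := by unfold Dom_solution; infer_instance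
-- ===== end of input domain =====

-- B replaces A's interleaved counting loop (mutating dict, per-person 0/1 branch) by sort-then-scan:
-- sort the flat list of occurrences in non-singleton groups, run-length count the adjacent runs,
-- then map every distinct person (first-occurrence order) to its run length (0 if absent).

-- ===== PORT A =====
def solution (data : List (List String)) : List (String × Int) :=
  (data.foldl (fun counts friend_group =>
      friend_group.foldl (fun counts person =>
        if friend_group.length = 1 then
          counts.insert person (counts.getD person 0 + 0)
        else
          counts.insert person (counts.getD person 0 + 1)) counts)
    PySem.Dict.empty).items

-- ===== PORT B =====
-- loop body of B's run-length pass (state = (prev, run, counts))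
def pvStep (st : Option String × Int × PySem.Dict String Int) (p : String) :
    Option String × Int × PySem.Dict String Int :=
  match st with
  | (none, _, counts) => (some p, 1, counts)
  | (some a, run, counts) =>
      if p = a then (some a, run + 1, counts) else (some p, 1, counts.insert a run)

-- final 'if prev is not None: counts[prev] = run'
def pvFlush (st : Option String × Int × PySem.Dict String Int) : PySem.Dict String Int :=
  match st with
  | (none, _, counts) => counts
  | (some a, run, counts) => counts.insert a run

-- members = sorted(p for g in data if len(g) != 1 for p in g); run-length scan;
-- {q: counts.get(q, 0) for q in dict.fromkeys(q for g in data for q in g)}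
def solution_alt (data : List (List String)) : List (String × Int) :=
  let members := PySem.List.sorted ((data.filter (fun g => g.length != 1)).flatMap (fun g => g))
      (fun x => x) false
  let counts := pvFlush (members.foldl pvStep (none, 0, PySem.Dict.empty))
  ((PySem.List.dedup (data.flatMap (fun g => g))).foldl
      (fun d q => d.insert q (counts.getD q 0)) PySem.Dict.empty).items

-- ===== PRECONDITION & SPEC =====
def Spec_solution (data : List (List String)) (out : List (String × Int)) : Prop := out = solution_alt data
instance (data : List (List String)) (out : List (String × Int)) : Decidable (Spec_solution data out) := by unfold Spec_solution; infer_instance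

-- ===== CLAIM (what is proved, stated in full; the proofs are below) =====
def Claim_equal_solution : Prop := ∀ (data : List (List String)), Dom_solution data → Spec_solution data (solution data)

-- ===== LEMMAS AND PROOFS =====

-- B's count of person k: occurrences of k in the non-singleton groups
def pvW (data : List (List String)) (k : String) : Int :=
  (((data.filter (fun g => g.length != 1)).flatten).count k : Int)

-- the "+ 0" inner loop of A changes no value
theorem pvGetD_zeroAdd (g : List String) (d : PySem.Dict String Int) (k : String) :
    (g.foldl (fun d p => d.insert p (d.getD p 0 + 0)) d).getD k 0 = d.getD k 0 := by
  induction g generalizing d with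
  | nil => rfl
  | cons p g ih =>
      simp only [List.foldl_cons, ih]
      rw [PySem.Dict.getD_insert]
      split_ifs with h
      · subst h; ring
      · rfl

-- values after A's outer loop
theorem pvA_getD (data : List (List String)) (d : PySem.Dict String Int) (k : String) :
    (data.foldl (fun counts friend_group =>
        friend_group.foldl (fun counts person =>
          if friend_group.length = 1 then
            counts.insert person (counts.getD person 0 + 0)
          else
            counts.insert person (counts.getD person 0 + 1)) counts) d).getD k 0
      = d.getD k 0 + pvW data k := by
  induction data generalizing d with
  | nil => simp [pvW]
  | cons g rest ih =>
      simp only [List.foldl_cons, ih]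
      by_cases hg : g.length = 1
      · simp only [hg, if_true]
        rw [pvGetD_zeroAdd]
        have : (g.length != 1) = false := by simpa using hg
        simp [pvW, this]
      · simp only [hg, if_false]
        rw [PySem.Dict.getD_foldl_insert_add_one]
        have : (g.length != 1) = true := by simpa using hg
        simp [pvW, this, List.count_append]
        ring
-- keys after A's outer loop: every person, in first-occurrence order
theorem pvA_keys (data : List (List String)) (d : PySem.Dict String Int) :
    (data.foldl (fun counts friend_group =>
        friend_group.foldl (fun counts person =>
          if friend_group.length = 1 then
            counts.insert person (counts.getD person 0 + 0)
          else
            counts.insert person (counts.getD person 0 + 1)) counts) d).keys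
      = PySem.Set.update d.keys data.flatten := by
  induction data generalizing d with
  | nil => simp [PySem.Set.update]
  | cons g rest ih =>
      simp only [List.foldl_cons, ih, List.flatten_cons]
      rw [PySem.Set.update_append]
      congr 1
      by_cases hg : g.length = 1
      · simp only [hg, if_true]
        exact PySem.Dict.keys_foldl_insert g (fun d p => d.getD p 0 + 0) d
      · simp only [hg, if_false]
        exact PySem.Dict.keys_foldl_insert g (fun d p => d.getD p 0 + 1) d

-- B's dict comprehension: value at k is f k once k is inserted (later overwrites write the same value)
theorem pvB_getD (l : List String) (f : String → Int) (d : PySem.Dict String Int) (k : String) :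
    (l.foldl (fun d p => d.insert p (f p)) d).getD k 0
      = if k ∈ l then f k else d.getD k 0 := by
  induction l generalizing d with
  | nil => simp
  | cons p l ih =>
      simp only [List.foldl_cons, ih, List.mem_cons]
      by_cases hl : k ∈ l
      · simp [hl]
      · by_cases hp : k = p
        · simp [hp]
        · simp [PySem.Dict.getD_insert, hp, hl]

-- the run-length scan on a sorted tail, started after seeing 'a' r times
theorem pvRL_getD (l : List String) (hl : l.Pairwise (· ≤ ·)) (a : String)
    (hle : ∀ x ∈ l, a ≤ x) (r : Int) (d : PySem.Dict String Int) (q : String) :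
    (pvFlush (l.foldl pvStep (some a, r, d))).getD q 0
      = if q = a then r + (l.count a : Int)
        else if q ∈ l then (l.count q : Int)
        else d.getD q 0 := by
  induction l generalizing a r d with
  | nil =>
      simp only [List.foldl_nil, pvFlush, List.count_nil, List.not_mem_nil]
      rw [PySem.Dict.getD_insert]
      split_ifs <;> simp_all
  | cons x l ih =>
      rw [List.pairwise_cons] at hl
      by_cases hx : x = a
      · subst hx
        simp only [List.foldl_cons, pvStep, if_true]
        rw [ih hl.2 x hl.1 (r + 1) d]
        by_cases hq : q = x
        · subst hq; simp; ring
        · simp [hq, List.mem_cons, Ne.symm hq]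
      · have hax : a < x := lt_of_le_of_ne (hle x (by simp)) (fun h => hx h.symm)
        simp only [List.foldl_cons, pvStep, if_neg hx]
        rw [ih hl.2 x hl.1 1 (d.insert a r)]
        have hanl : a ∉ l := fun h => absurd (hl.1 a h) (not_le.mpr hax)
        by_cases hq : q = x
        · subst hq
          have hqa : ¬ q = a := hx
          simp [hqa]
          ring
        · by_cases hql : q ∈ l
          · have hqa : ¬ q = a := fun h => hanl (h ▸ hql)
            simp [hq, hql, hqa, Ne.symm hq]
          · rw [PySem.Dict.getD_insert]
            by_cases hqa : q = a
            · subst hqa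
              have : l.count q = 0 := List.count_eq_zero.mpr hanl
              simp [hq, hql, this, hx]
            · simp [hq, hql, hqa]

-- the whole run-length pass computes the multiplicity of each person
theorem pvRL_count (l : List String) (hl : l.Pairwise (· ≤ ·)) (q : String) :
    (pvFlush (l.foldl pvStep (none, 0, PySem.Dict.empty))).getD q 0 = (l.count q : Int) := by
  cases l with
  | nil => simp [pvFlush, PySem.Dict.getD_empty]
  | cons m t =>
      rw [List.pairwise_cons] at hl
      simp only [List.foldl_cons, pvStep]
      rw [pvRL_getD t hl.2 m hl.1 1 PySem.Dict.empty q]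
      by_cases hq : q = m
      · subst hq; simp; ring
      · have hmq : ¬ m = q := fun h => hq h.symm
        by_cases hqt : q ∈ t
        · simp [hq, hqt, hmq]
        · simp [hq, hqt, hmq, List.count_eq_zero.mpr hqt]

-- ===== VERDICT (by name: the statement is the Claim_ definition above) =====
theorem solution_spec : Claim_equal_solution := by
  intro data _
  unfold Spec_solution solution solution_alt
  simp only [PySem.List.dedup_eq_ofList, List.flatMap_id']
  -- A: keys
  have hkA : _ := pvA_keys data PySem.Dict.empty
  have hkeys0 : (PySem.Dict.empty : PySem.Dict String Int).keys = [] := rfl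
  rw [hkeys0, PySem.Set.update_nil_left] at hkA
  have hndS : (PySem.Set.ofList data.flatten).Nodup := PySem.Set.nodup_ofList _
  have hndA : _ := hkA ▸ hndS
  -- B: the run-length dict reads the multiplicity of each person among counting occurrences
  set M := (List.filter (fun g => g.length != 1) data).flatten with hM
  have hsorted : (PySem.List.sorted M (fun x => x) false).Pairwise (· ≤ ·) := by
    simpa using PySem.List.sorted_pairwise M (fun x => x)
  have hcnt : ∀ q, (pvFlush ((PySem.List.sorted M (fun x => x) false).foldl pvStep
      (none, 0, PySem.Dict.empty))).getD q 0 = (M.count q : Int) := by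
    intro q
    rw [pvRL_count _ hsorted q, (PySem.List.sorted_perm M (fun x => x) false).count_eq]
  -- B: keys
  have hkB : _ := PySem.Dict.keys_foldl_insert (PySem.Set.ofList data.flatten)
      (fun _ q => (pvFlush ((PySem.List.sorted M (fun x => x) false).foldl pvStep
          (none, 0, PySem.Dict.empty))).getD q 0)
      PySem.Dict.empty
  rw [hkeys0, PySem.Set.update_nil_left,
      PySem.Set.ofList_eq_self_of_nodup _ hndS] at hkB
  have hndB : _ := hkB ▸ hndS
  -- compare items keywise
  rw [PySem.Dict.items_eq_map_keys _ hndA (0 : Int), PySem.Dict.items_eq_map_keys _ hndB (0 : Int),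
    hkA, hkB]
  apply List.map_congr_left
  intro k hk
  have hA := pvA_getD data PySem.Dict.empty k
  have hB := pvB_getD (PySem.Set.ofList data.flatten)
      (fun q => (pvFlush ((PySem.List.sorted M (fun x => x) false).foldl pvStep
          (none, 0, PySem.Dict.empty))).getD q 0)
      PySem.Dict.empty k
  simp only [hA, hB, hk, if_true, PySem.Dict.getD_empty, zero_add, hcnt k]
  simp [pvW, hM]
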